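-- pv_equiv track=rewrite | github.com/raafay-s/CS-303E | Quiz4C.py | lastVowelLocations
-- ===== SOURCE A (Python) =====
-- def lastVowelLocations(strings):
--     vowels = set("aeiouAEIOU")
--     result = {}
--     for word in strings:
--         last_index = -1
--         for i in range(len(word)):
--             if word[i] in vowels:
--                 last_index = i
--         result[word] = last_index
--     return result
-- ===== SOURCE B (Python) =====
-- def lastVowelLocations(strings):
--     vowels = set("aeiouAEIOU")
--     result = {}
--     for word in strings:
--         loc = -1
--         for i in range(len(word) - 1, -1, -1):
--             if word[i] in vowels:
--                 loc = i
--                 break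
--         result[word] = loc
--     return result
-- ===== Notes on version B (the rewrite author's own statement) =====
-- stated objective: alternative
-- what changed: B scans each word backwards from the last character and stops at the first vowel it meets (an early-exit reverse loop), instead of A's full forward scan that keeps overwriting a last-seen accumulator.
import Mathlib
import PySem

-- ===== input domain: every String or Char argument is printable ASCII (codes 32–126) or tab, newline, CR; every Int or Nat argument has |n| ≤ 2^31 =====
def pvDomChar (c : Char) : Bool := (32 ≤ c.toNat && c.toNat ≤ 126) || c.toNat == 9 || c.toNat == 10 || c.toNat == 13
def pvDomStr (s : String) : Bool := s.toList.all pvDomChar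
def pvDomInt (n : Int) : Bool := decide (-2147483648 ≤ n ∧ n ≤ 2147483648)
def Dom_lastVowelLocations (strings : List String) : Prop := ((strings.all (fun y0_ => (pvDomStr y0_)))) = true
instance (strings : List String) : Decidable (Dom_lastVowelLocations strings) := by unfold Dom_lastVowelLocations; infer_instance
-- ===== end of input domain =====

-- B replaces A's full forward scan (last-seen accumulator) by an early-exit reverse scan per word; alternative decomposition, same result.

-- ===== PORT A =====
def pvVowels : PySem.Set Char := PySem.Set.ofList "aeiouAEIOU".toList

def lastVowelLocations (strings : List String) : List (String × Int) :=
  (strings.foldl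
    (fun (result : PySem.Dict String Int) word =>
      let lastIndex : Int :=
        (PySem.List.pyRange 0 (PySem.Str.len word) 1).foldl
          (fun li i =>
            if (PySem.Str.pyGet? word i).any (fun c => PySem.Set.contains pvVowels c) then i else li)
          (-1)
      result.insert word lastIndex)
    PySem.Dict.empty).items

-- ===== PORT B =====
-- reverse loop 'for i in range(len(word)-1, -1, -1): … break' as descending recursion on the index bound
def pvRevScan (cs : List Char) : Nat → Int
  | 0 => -1
  | n + 1 =>
    if (PySem.List.pyGet? cs (n : Int)).any (fun c => PySem.Set.contains pvVowels c) then (n : Int)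
    else pvRevScan cs n

def lastVowelLocations_alt (strings : List String) : List (String × Int) :=
  (strings.foldl
    (fun (result : PySem.Dict String Int) word =>
      result.insert word (pvRevScan word.toList word.toList.length))
    PySem.Dict.empty).items

-- ===== PRECONDITION & SPEC =====
def Spec_lastVowelLocations (strings : List String) (out : List (String × Int)) : Prop := out = lastVowelLocations_alt strings
instance (strings : List String) (out : List (String × Int)) : Decidable (Spec_lastVowelLocations strings out) := by unfold Spec_lastVowelLocations; infer_instance

-- ===== CLAIM (what is proved, stated in full; the proofs are below) =====
def Claim_equal_lastVowelLocations : Prop := ∀ (strings : List String), Dom_lastVowelLocations strings → Spec_lastVowelLocations strings (lastVowelLocations strings)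

-- ===== LEMMAS AND PROOFS =====

-- A's forward last-write-wins scan over range(n) computes the same index as B's reverse first-hit scan.
theorem pv_fwd_eq_rev (cs : List Char) (n : Nat) :
    (PySem.List.pyRange 0 (n : Int) 1).foldl
      (fun li i =>
        if (PySem.List.pyGet? cs i).any (fun c => PySem.Set.contains pvVowels c) then i else li)
      (-1) = pvRevScan cs n := by
  induction n with
  | zero => simp [PySem.List.pyRange_one_eq_nil, pvRevScan]
  | succ n ih =>
    have h : (PySem.List.pyRange 0 ((n : Int) + 1) 1) = PySem.List.pyRange 0 (n : Int) 1 ++ [(n : Int)] :=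
      PySem.List.pyRange_one_succ_right (by omega)
    have hcast : ((n + 1 : Nat) : Int) = (n : Int) + 1 := by omega
    rw [hcast, h, List.foldl_append, ih, pvRevScan]
    simp

theorem lastVowelLocations_eq_alt (strings : List String) :
    lastVowelLocations strings = lastVowelLocations_alt strings := by
  unfold lastVowelLocations lastVowelLocations_alt
  congr 2
  funext result word
  simp only [PySem.Str.len_eq, PySem.Str.pyGet?_eq]
  simp only [PySem.Chars.pyGet?_eq_listPyGet?]
  exact congrArg (result.insert word) (pv_fwd_eq_rev word.toList word.toList.length)

-- ===== VERDICT (by name: the statement is the Claim_ definition above) =====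
theorem lastVowelLocations_spec : Claim_equal_lastVowelLocations := by
  intro strings _
  unfold Spec_lastVowelLocations
  exact lastVowelLocations_eq_alt strings
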